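-- pv_equiv track=rewrite | github.com/Noce99/Nut_NLI | train.py | from_list_to_string
-- ===== SOURCE A (Python) =====
-- def from_list_to_string(jsonl_list):
--     i = 0
--     a_string = ""
--     while i < len(jsonl_list):
--         if jsonl_list[i] is not None:
--             a_string += str(jsonl_list[i])
--         else:
--             break
--         i += 1
--     return a_string
-- ===== SOURCE B (Python) =====
-- def from_list_to_string(jsonl_list):
--     # Phase 1: find the stopping point (first None) and slice the prefix.
--     if None in jsonl_list:
--         prefix = jsonl_list[:jsonl_list.index(None)]
--     else:
--         prefix = jsonl_list
--     # Phase 2: one join pass over the prefix.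
--     return "".join(str(x) for x in prefix)
-- ===== Notes on version B (the rewrite author's own statement) =====
-- stated objective: idiomatic
-- what changed: Replaces the index-plus-accumulator while-loop (repeated string concatenation with an early break) by a two-phase decomposition: find the first None and slice the prefix, then build the result with a single ''.join.
import Mathlib
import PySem

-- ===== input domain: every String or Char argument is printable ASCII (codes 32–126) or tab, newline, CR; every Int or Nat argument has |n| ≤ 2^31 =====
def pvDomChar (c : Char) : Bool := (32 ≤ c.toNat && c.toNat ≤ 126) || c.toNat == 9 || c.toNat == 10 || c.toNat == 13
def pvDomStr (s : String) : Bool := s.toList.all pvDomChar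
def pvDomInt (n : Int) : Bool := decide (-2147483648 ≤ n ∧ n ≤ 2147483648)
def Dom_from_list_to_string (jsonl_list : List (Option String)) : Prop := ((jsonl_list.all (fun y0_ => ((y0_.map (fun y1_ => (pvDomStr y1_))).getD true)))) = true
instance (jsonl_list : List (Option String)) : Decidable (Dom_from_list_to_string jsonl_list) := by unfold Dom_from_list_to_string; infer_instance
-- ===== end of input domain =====

-- B replaces A's index-and-accumulator while-loop by "slice the prefix before the first None, then one join" (idiomatic decomposition).


-- ===== PORT A =====
-- the while loop over index i with accumulator a_string, breaking at the first None;
-- the accumulated string is kept as a List Char (Lean's String.append is kernel-opaque)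
def fromListLoopA : List (Option String) → List Char → List Char
  | [], acc => acc
  | some s :: rest, acc => fromListLoopA rest (acc ++ s.toList)   -- a_string += str(jsonl_list[i])
  | none :: _, acc => acc                                         -- break

def from_list_to_string (jsonl_list : List (Option String)) : String :=
  String.ofList (fromListLoopA jsonl_list [])

-- ===== PORT B =====
def from_list_to_string_alt (jsonl_list : List (Option String)) : String :=
  -- Phase 1: slice the prefix before the first None (if any)
  let prefix_ := if none ∈ jsonl_list
                 then jsonl_list.take ((PySem.List.index? jsonl_list none).getD 0)
                 else jsonl_list
  -- Phase 2: one join pass; str(x) on a non-None element is the string itself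
  PySem.Str.join "" (prefix_.map (fun o => o.getD ""))

-- ===== PRECONDITION & SPEC =====
def Spec_from_list_to_string (jsonl_list : List (Option String)) (out : String) : Prop := out = from_list_to_string_alt jsonl_list
instance (jsonl_list : List (Option String)) (out : String) : Decidable (Spec_from_list_to_string jsonl_list out) := by unfold Spec_from_list_to_string; infer_instance

-- ===== CLAIM (what is proved, stated in full; the proofs are below) =====
def Claim_equal_from_list_to_string : Prop := ∀ (jsonl_list : List (Option String)), Dom_from_list_to_string jsonl_list → Spec_from_list_to_string jsonl_list (from_list_to_string jsonl_list)

-- ===== LEMMAS AND PROOFS =====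

-- B's prefix is exactly the takeWhile-isSome prefix
lemma prefixB_eq_takeWhile (l : List (Option String)) :
    (if none ∈ l then l.take ((PySem.List.index? l none).getD 0) else l)
      = l.takeWhile Option.isSome := by
  induction l with
  | nil => simp
  | cons x xs ih =>
    cases x with
    | none =>
      rw [if_pos (List.mem_cons_self), PySem.List.index?_cons_self]
      simp
    | some s =>
      by_cases h : (none : Option String) ∈ xs
      · rw [if_pos (by simp [h]), PySem.List.index?_cons_of_ne _ (by simp)]
        obtain ⟨k, hk⟩ := Option.isSome_iff_exists.mp ((PySem.List.index?_isSome_iff _ _).mpr h)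
        rw [if_pos h] at ih
        simp only [hk, Option.map_some, Option.getD_some, List.take_succ_cons,
          List.takeWhile_cons, Option.isSome_some, if_true, List.cons.injEq, true_and]
        rw [PySem.List.index?_eq_idxOf?] at hk
        simpa [hk] using ih
      · rw [if_neg (by simp [h]), List.takeWhile_cons]
        rw [if_neg h] at ih
        simpa using ih

-- A's loop accumulates the flattened takeWhile prefix
lemma loopA_eq (l : List (Option String)) (acc : List Char) :
    fromListLoopA l acc
      = acc ++ ((l.takeWhile Option.isSome).map (fun o => (o.getD "").toList)).flatten := by
  induction l generalizing acc with
  | nil => simp [fromListLoopA]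
  | cons x xs ih =>
    cases x with
    | none => simp [fromListLoopA]
    | some s => simp [fromListLoopA, ih]

-- join with the empty separator is flatten
lemma chars_join_empty (parts : List (List Char)) :
    PySem.Chars.join [] parts = parts.flatten := by
  induction parts with
  | nil => rfl
  | cons p ps ih =>
    cases ps with
    | nil => simp [PySem.Chars.join, List.intercalate]
    | cons q qs =>
      simp only [PySem.Chars.join, List.intercalate, List.intersperse] at ih ⊢
      simp only [List.flatten_cons] at ih ⊢
      rw [← ih]
      simp

lemma join_empty (parts : List String) :
    (PySem.Str.join "" parts).toList = (parts.map String.toList).flatten := by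
  rw [PySem.Str.toList_join]
  have : ("" : String).toList = [] := rfl
  rw [this, chars_join_empty]

-- ===== VERDICT (by name: the statement is the Claim_ definition above) =====
theorem from_list_to_string_spec : Claim_equal_from_list_to_string := by
  intro l _
  unfold Spec_from_list_to_string from_list_to_string from_list_to_string_alt
  apply String.ext
  rw [prefixB_eq_takeWhile, join_empty, String.toList_ofList, loopA_eq]
  simp [Function.comp_def]
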